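-- pv_equiv track=rewrite | github.com/pleft/omega-python-oled | OledLib.py | rotateBitmap180
-- ===== SOURCE A (Python) =====
-- def rotateBitmap180(bitmap):
--     """
--         Rotates the `bitmap` 180 degrees.
--     """
--     width = len(bitmap[0])
--     height = len(bitmap)
--     rotated = [[0 for i in range(width)] for j in range(height)]
--     for x in range(width):
--         for y in range(height):
--             rotated[y][x] = bitmap[height-1-y][x]
--     return rotated
-- ===== SOURCE B (Python) =====
-- def rotateBitmap180(bitmap):
--     """
--         Rotates the `bitmap` 180 degrees.
--     """
--     width = len(bitmap[0])
--     return [row[:width] for row in reversed(bitmap)]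
-- ===== Notes on version B (the rewrite author's own statement) =====
-- stated objective: simpler
-- what changed: Replaces A's zero-matrix preallocation plus nested per-cell index-assignment loop with a single reverse pass that copies each row via a width-bounded slice, removing the intermediate mutable grid and all per-cell Python-level indexing.
import Mathlib
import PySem

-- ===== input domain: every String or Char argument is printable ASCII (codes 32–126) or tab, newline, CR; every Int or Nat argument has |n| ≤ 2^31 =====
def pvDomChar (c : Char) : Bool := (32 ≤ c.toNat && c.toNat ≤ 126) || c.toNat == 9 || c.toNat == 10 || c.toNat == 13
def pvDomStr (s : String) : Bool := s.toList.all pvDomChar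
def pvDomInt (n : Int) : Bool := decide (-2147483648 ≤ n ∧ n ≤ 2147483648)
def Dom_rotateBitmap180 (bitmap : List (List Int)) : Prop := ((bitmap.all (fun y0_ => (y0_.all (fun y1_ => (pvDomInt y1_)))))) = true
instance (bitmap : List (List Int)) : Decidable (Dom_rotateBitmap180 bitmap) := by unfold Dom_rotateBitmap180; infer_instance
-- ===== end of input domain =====

-- B builds the result in one reverse pass copying each row (width-bounded slice) instead of
-- A's preallocated zero grid filled by a nested per-cell indexing loop; objective: simpler.

-- ===== PORT A =====
-- width = len(bitmap[0]); height = len(bitmap); rotated = zero grid;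
-- for x in range(width): for y in range(height): rotated[y][x] = bitmap[height-1-y][x]
-- (all indices are in range under Pre_, so List.set / getD transcribe the in-range assignments exactly)
def rotateBitmap180 (bitmap : List (List Int)) : List (List Int) :=
  let width := ((PySem.List.pyGet? bitmap 0).getD []).length
  let height := bitmap.length
  let rotated := (List.range height).map (fun _ => (List.range width).map (fun _ => (0 : Int)))
  (List.range width).foldl (fun rot x =>
    (List.range height).foldl (fun rot y =>
      rot.set y ((rot.getD y []).set x ((bitmap.getD (height - 1 - y) []).getD x 0))) rot) rotated

-- ===== PORT B =====
-- width = len(bitmap[0]); return [row[:width] for row in reversed(bitmap)]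
def rotateBitmap180_alt (bitmap : List (List Int)) : List (List Int) :=
  let width := ((PySem.List.pyGet? bitmap 0).getD []).length
  bitmap.reverse.map (fun row => PySem.List.slice row none (some (width : Int)))

-- ===== PRECONDITION & SPEC =====
-- Pre_ excludes exactly the inputs where A raises IndexError: the empty bitmap (bitmap[0]),
-- and bitmaps with a row shorter than the first row (bitmap[height-1-y][x] with x < width).
def Pre_rotateBitmap180 (bitmap : List (List Int)) : Prop :=
  bitmap ≠ [] ∧ ∀ row ∈ bitmap, (bitmap.headD []).length ≤ row.length
instance (bitmap : List (List Int)) : Decidable (Pre_rotateBitmap180 bitmap) := by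
  unfold Pre_rotateBitmap180; infer_instance
def pvWitness_rotateBitmap180 : List (List Int) := [[1, 2], [3, 4], [5, 6]]

def Spec_rotateBitmap180 (bitmap : List (List Int)) (out : List (List Int)) : Prop :=
  out = rotateBitmap180_alt bitmap
instance (bitmap : List (List Int)) (out : List (List Int)) : Decidable (Spec_rotateBitmap180 bitmap out) := by
  unfold Spec_rotateBitmap180; infer_instance

-- ===== CLAIM (what is proved, stated in full; the proofs are below) =====
def Claim_equal_rotateBitmap180 : Prop := ∀ (bitmap : List (List Int)), Dom_rotateBitmap180 bitmap → Pre_rotateBitmap180 bitmap → Spec_rotateBitmap180 bitmap (rotateBitmap180 bitmap)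

-- ===== LEMMAS AND PROOFS =====

theorem pv_inner_len (f : ℕ → List Int → List Int) :
    ∀ (n : ℕ) (r : List (List Int)),
      ((List.range n).foldl (fun r y => r.set y (f y ((r[y]?).getD []))) r).length = r.length := by
  intro n
  induction n with
  | zero => intro r; simp
  | succ n ih =>
    intro r
    rw [List.range_succ, List.foldl_append]
    simp only [List.foldl_cons, List.foldl_nil]
    rw [List.length_set, ih]

theorem pv_inner_get (f : ℕ → List Int → List Int) :
    ∀ (n : ℕ) (r : List (List Int)) (j : ℕ),
      ((List.range n).foldl (fun r y => r.set y (f y ((r[y]?).getD []))) r)[j]? =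
        if j < n then (r[j]?).map (f j) else r[j]? := by
  intro n
  induction n with
  | zero => intro r j; simp
  | succ n ih =>
    intro r j
    rw [List.range_succ, List.foldl_append]
    simp only [List.foldl_cons, List.foldl_nil]
    rw [List.getElem?_set]
    by_cases hj : j = n
    · subst hj
      rw [if_pos rfl, pv_inner_len]
      have hR : ((List.range j).foldl (fun r y => r.set y (f y ((r[y]?).getD []))) r)[j]? = r[j]? := by
        rw [ih]; simp
      rw [hR]
      by_cases hlen : j < r.length
      · have h2 : r[j]? = some r[j] := List.getElem?_eq_getElem hlen
        rw [if_pos hlen, h2]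
        simp
      · have h2 : r[j]? = none := List.getElem?_eq_none (by omega)
        rw [if_neg hlen, h2]
        simp
    · rw [if_neg (fun h => hj h.symm), ih]
      by_cases h1 : j < n
      · simp [h1, Nat.lt_succ_of_lt h1]
      · have h2 : ¬ j < n + 1 := by omega
        simp [h1, h2]

theorem pv_row_len (g : ℕ → Int) :
    ∀ (m : ℕ) (row : List Int),
      ((List.range m).foldl (fun row x => row.set x (g x)) row).length = row.length := by
  intro m
  induction m with
  | zero => intro row; simp
  | succ m ih =>
    intro row
    rw [List.range_succ, List.foldl_append]
    simp only [List.foldl_cons, List.foldl_nil]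
    rw [List.length_set, ih]

theorem pv_row_get (g : ℕ → Int) :
    ∀ (m : ℕ) (row : List Int) (j : ℕ),
      ((List.range m).foldl (fun row x => row.set x (g x)) row)[j]? =
        if j < m ∧ j < row.length then some (g j) else row[j]? := by
  intro m
  induction m with
  | zero => intro row j; simp
  | succ m ih =>
    intro row j
    rw [List.range_succ, List.foldl_append]
    simp only [List.foldl_cons, List.foldl_nil]
    rw [List.getElem?_set]
    by_cases hj : j = m
    · subst hj
      rw [if_pos rfl, pv_row_len]
      by_cases hlen : j < row.length
      · rw [if_pos hlen, if_pos ⟨by omega, hlen⟩]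
      · have h2 : row[j]? = none := List.getElem?_eq_none (by omega)
        rw [if_neg hlen, if_neg (by omega), h2]
    · rw [if_neg (fun h => hj h.symm), ih]
      by_cases h1 : j < m ∧ j < row.length
      · rw [if_pos h1, if_pos ⟨by omega, h1.2⟩]
      · rw [if_neg h1, if_neg (by omega)]

theorem pv_outer_get (h : ℕ) (v : ℕ → ℕ → Int) :
    ∀ (m : ℕ) (r : List (List Int)) (j : ℕ),
      ((List.range m).foldl (fun rot x =>
          (List.range h).foldl (fun rot y => rot.set y (((rot[y]?).getD []).set x (v x y))) rot) r)[j]? =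
        if j < h then (r[j]?).map (fun row => (List.range m).foldl (fun row x => row.set x (v x j)) row)
        else r[j]? := by
  intro m
  induction m with
  | zero =>
    intro r j
    simp only [List.range_zero, List.foldl_nil, Option.map_id']
    split <;> rfl
  | succ m ih =>
    intro r j
    rw [List.range_succ, List.foldl_append]
    simp only [List.foldl_cons, List.foldl_nil]
    rw [pv_inner_get (fun y l => l.set m (v m y)) h _ j, ih]
    by_cases hj : j < h
    · rw [if_pos hj, if_pos hj, if_pos hj, Option.map_map]
      congr 1
      funext row
      rw [List.foldl_append]
      rfl
    · rw [if_neg hj, if_neg hj, if_neg hj]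

theorem rotateBitmap180_spec : Claim_equal_rotateBitmap180 := by
  intro bitmap _ hpre
  unfold Spec_rotateBitmap180
  obtain ⟨hne, hall⟩ := hpre
  cases bitmap with
  | nil => exact absurd rfl hne
  | cons hd tl =>
    simp only [rotateBitmap180, rotateBitmap180_alt, List.getD_eq_getElem?_getD]
    have hget0 : PySem.List.pyGet? (hd :: tl) 0 = some hd := by
      simp [PySem.List.pyGet?, PySem.List.pyIdx?]
    rw [hget0]
    simp only [Option.getD_some]
    set h := (hd :: tl).length with hh
    set w := hd.length with hw
    apply List.ext_getElem?
    intro j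
    rw [pv_outer_get h (fun x y => (((hd :: tl)[h - 1 - y]?).getD [])[x]?.getD 0) w _ j]
    by_cases hj : j < h
    · rw [if_pos hj]
      -- source row for output row j
      have hjc : h - 1 - j < h := by omega
      have hrow : (hd :: tl)[h - 1 - j]? = some ((hd :: tl)[h - 1 - j]'hjc) := List.getElem?_eq_getElem hjc
      have hrl : w ≤ ((hd :: tl)[h - 1 - j]'hjc).length :=
        hall _ (List.getElem_mem hjc)
      -- left side: rotated[j]? = some zeroRow
      have hz : ((List.range h).map (fun _ => (List.range w).map (fun _ => (0 : Int))))[j]? =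
          some ((List.range w).map (fun _ => (0 : Int))) := by
        rw [List.getElem?_map, List.getElem?_range hj]; rfl
      rw [hz]
      -- right side
      have hrev : (hd :: tl).reverse[j]? = (hd :: tl)[h - 1 - j]? := by
        rw [List.getElem?_reverse (hh ▸ hj)]
      rw [List.getElem?_map, hrev, hrow]
      simp only [Option.map_some]
      congr 1
      rw [PySem.List.slice_to_natCast]
      apply List.ext_getElem?
      intro i
      rw [pv_row_get, List.getElem?_take]
      by_cases hi : i < w
      · have hzl : ((List.range w).map (fun _ => (0 : Int))).length = w := by simp
        rw [if_pos ⟨hi, by rw [hzl]; exact hi⟩, if_pos hi]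
        simp only [Option.getD_some]
        rw [List.getElem?_eq_getElem (by omega : i < ((hd :: tl)[h - 1 - j]'hjc).length)]
        rfl
      · rw [if_neg (by simp [hi]), if_neg hi]
        rw [List.getElem?_map]
        have : (List.range w)[i]? = none := by
          rw [List.getElem?_eq_none]; simpa using Nat.le_of_not_lt hi
        rw [this]; rfl
    · rw [if_neg hj]
      have h1 : ((List.range h).map (fun _ => (List.range w).map (fun _ => (0 : Int))))[j]? = none := by
        rw [List.getElem?_eq_none]; simpa using Nat.le_of_not_lt hj
      have h2 : ((hd :: tl).reverse.map (fun row => PySem.List.slice row none (some (w : Int))))[j]? = none := by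
        rw [List.getElem?_eq_none]; simpa using Nat.le_of_not_lt hj
      rw [h1, h2]
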